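-- pv_equiv track=rewrite | github.com/Auto-Mech/autochem | automol/pot/_read.py | _extrema_triplets
-- ===== SOURCE A (Python) =====
-- def _extrema_triplets(loc_max, loc_min, final_idx):
--     """ Build a tuple of triplets for each local maxima where
--         each triplet consists of the idx of the maxima and the
--         idxs of the minima (or grid endpoint) the maxima is connected
--         to.
--
--         param final_idx: index for the final point on the grid (in 0-index)
--     """
--
--     trips = tuple()
--     for lmax in loc_max:
--
--         # Find inner min connected to emax
--         in_idx = lmax
--         while in_idx not in loc_min and in_idx != 0:
--             in_idx -= 1
--
--         # Find outer min connected to emax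
--         out_idx = lmax
--         while out_idx not in loc_min and out_idx != final_idx:
--             out_idx += 1
--
--         # Add to the triplet lst
--         trips += ((in_idx, lmax, out_idx),)
--
--     return trips
-- ===== SOURCE B (Python) =====
-- def _extrema_triplets(loc_max, loc_min, final_idx):
--     """For each local max, pick the largest minimum in [0, lmax] (default 0)
--     and the smallest minimum in [lmax, final_idx] (default final_idx),
--     instead of scanning the grid index by index."""
--     return tuple(
--         (max((m for m in loc_min if 0 <= m <= lmax), default=0),
--          lmax,
--          min((m for m in loc_min if lmax <= m <= final_idx), default=final_idx))
--         for lmax in loc_max)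
-- ===== Notes on version B (the rewrite author's own statement) =====
-- stated objective: alternative
-- what changed: B replaces A's step-by-step index walk away from each maximum (cost proportional to the distance to the nearest minimum or endpoint) with a direct max/min over the minima filtered to [0,lmax] and [lmax,final_idx].
-- outside the precondition, e.g. on _extrema_triplets([-2], [-5], 4): A returns ((-5, -2, 4),), B returns ((0, -2, 4),); on _extrema_triplets([7], [9], 4): A returns ((0, 7, 9),), B returns ((0, 7, 4),)
import Mathlib
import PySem

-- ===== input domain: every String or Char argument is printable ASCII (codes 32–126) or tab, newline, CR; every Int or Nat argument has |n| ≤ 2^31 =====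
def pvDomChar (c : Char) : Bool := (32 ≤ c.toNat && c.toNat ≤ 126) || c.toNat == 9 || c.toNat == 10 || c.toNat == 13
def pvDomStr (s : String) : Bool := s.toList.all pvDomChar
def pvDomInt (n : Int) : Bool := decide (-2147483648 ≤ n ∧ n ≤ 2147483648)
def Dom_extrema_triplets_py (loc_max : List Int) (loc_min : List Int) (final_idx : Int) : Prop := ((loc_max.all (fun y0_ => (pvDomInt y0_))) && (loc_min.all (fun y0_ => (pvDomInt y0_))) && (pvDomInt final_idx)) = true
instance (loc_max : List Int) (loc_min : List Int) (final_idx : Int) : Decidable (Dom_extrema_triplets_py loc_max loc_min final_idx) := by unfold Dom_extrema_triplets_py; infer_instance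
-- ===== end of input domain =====

-- B replaces A's step-by-step index walk away from each maximum with a direct
-- max/min over the minima filtered to [0, lmax] resp. [lmax, final_idx] (objective: alternative).

-- ===== PORT A =====
-- A's inner while loop: walk downward until the index is a minimum or 0.
-- Fuel (lmax.toNat + 1) only makes the recursion total; under Pre_ it never runs out.
def pyDown (loc_min : List Int) : Nat → Int → Int
  | 0, i => i
  | f + 1, i => if ¬ loc_min.contains i ∧ i ≠ 0 then pyDown loc_min f (i - 1) else i

-- A's outer while loop: walk upward until the index is a minimum or final_idx.
def pyUp (loc_min : List Int) (final_idx : Int) : Nat → Int → Int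
  | 0, i => i
  | f + 1, i => if ¬ loc_min.contains i ∧ i ≠ final_idx then pyUp loc_min final_idx f (i + 1) else i

def extrema_triplets_py (loc_max : List Int) (loc_min : List Int) (final_idx : Int) : List (List Int) :=
  loc_max.foldl (fun trips lmax =>
    trips ++ [[pyDown loc_min (lmax.toNat + 1) lmax, lmax,
               pyUp loc_min final_idx ((final_idx - lmax).toNat + 1) lmax]]) []

-- ===== PORT B =====
def extrema_triplets_py_alt (loc_max : List Int) (loc_min : List Int) (final_idx : Int) : List (List Int) :=
  loc_max.map (fun lmax =>
    [(PySem.List.max? (loc_min.filter (fun m => decide (0 ≤ m) && decide (m ≤ lmax))) (fun x => x)).getD 0,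
     lmax,
     (PySem.List.min? (loc_min.filter (fun m => decide (lmax ≤ m) && decide (m ≤ final_idx))) (fun x => x)).getD final_idx])

-- ===== PRECONDITION & SPEC =====
-- Pre_ restricts maxima to the grid [0, final_idx] (the function's stated domain: grid indices).
-- Outside it A's index walks can loop forever (lmax < 0 with no minimum below it, or
-- lmax > final_idx with no minimum above it); where A does return outside Pre_ (a minimum
-- lies beyond the walked endpoint) its value mixes grid endpoints with off-grid minima and
-- B's grid-clipped value is excluded together with the divergent cases (see claim cites).
def Pre_extrema_triplets_py (loc_max : List Int) (loc_min : List Int) (final_idx : Int) : Prop :=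
  ∀ lmax ∈ loc_max, 0 ≤ lmax ∧ lmax ≤ final_idx
instance (loc_max : List Int) (loc_min : List Int) (final_idx : Int) : Decidable (Pre_extrema_triplets_py loc_max loc_min final_idx) := by unfold Pre_extrema_triplets_py; infer_instance

def pvWitness_extrema_triplets_py : List Int × List Int × Int := ([1, 3], [2, 5], 4)

def Spec_extrema_triplets_py (loc_max : List Int) (loc_min : List Int) (final_idx : Int) (out : List (List Int)) : Prop := out = extrema_triplets_py_alt loc_max loc_min final_idx
instance (loc_max : List Int) (loc_min : List Int) (final_idx : Int) (out : List (List Int)) : Decidable (Spec_extrema_triplets_py loc_max loc_min final_idx out) := by unfold Spec_extrema_triplets_py; infer_instance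

-- ===== CLAIM (what is proved, stated in full; the proofs are below) =====
def Claim_equal_extrema_triplets_py : Prop := ∀ (loc_max : List Int) (loc_min : List Int) (final_idx : Int), Dom_extrema_triplets_py loc_max loc_min final_idx → Pre_extrema_triplets_py loc_max loc_min final_idx → Spec_extrema_triplets_py loc_max loc_min final_idx (extrema_triplets_py loc_max loc_min final_idx)

-- ===== LEMMAS AND PROOFS =====

theorem max_getD_of_isMax {l : List Int} {b d : Int} (hb : b ∈ l) (hmax : ∀ y ∈ l, y ≤ b) :
    (PySem.List.max? l (fun x => x)).getD d = b := by
  cases h : PySem.List.max? l (fun x => x) with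
  | none =>
    rw [PySem.List.max?_eq_none_iff] at h
    subst h; cases hb
  | some m =>
    have hm := PySem.List.max?_mem h
    have hle := PySem.List.max?_isMax h b hb
    have := hmax m hm
    simp only [Option.getD_some]
    omega

theorem min_getD_of_isMin {l : List Int} {b d : Int} (hb : b ∈ l) (hmin : ∀ y ∈ l, b ≤ y) :
    (PySem.List.min? l (fun x => x)).getD d = b := by
  cases h : PySem.List.min? l (fun x => x) with
  | none =>
    rw [PySem.List.min?_eq_none_iff] at h
    subst h; cases hb
  | some m =>
    have hm := PySem.List.min?_mem h
    have hle := PySem.List.min?_isMin h b hb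
    have := hmin m hm
    simp only [Option.getD_some]
    omega

theorem down_eq (loc_min : List Int) : ∀ (n : Nat) (i : Int), i = (n : Int) →
    pyDown loc_min (n + 1) i
      = (PySem.List.max? (loc_min.filter (fun m => decide (0 ≤ m) && decide (m ≤ i))) (fun x => x)).getD 0 := by
  intro n
  induction n with
  | zero =>
    intro i hi; subst hi
    simp only [Int.natCast_zero, pyDown, ne_eq, not_true_eq_false, and_false, if_false]
    cases h : PySem.List.max? ((0 : Int) :: [] |> fun _ => loc_min.filter (fun m => decide (0 ≤ m) && decide (m ≤ (0:Int)))) (fun x => x) with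
    | none => rfl
    | some m =>
      have hm := PySem.List.max?_mem h
      simp only [List.mem_filter, Bool.and_eq_true, decide_eq_true_eq] at hm
      simp only [Option.getD_some]
      omega
  | succ k ih =>
    intro i hi
    have hpos : (0 : Int) < i := by omega
    show (if ¬ loc_min.contains i ∧ i ≠ 0 then pyDown loc_min (k + 1) (i - 1) else i) = _
    by_cases hc : loc_min.contains i
    · have hmem : i ∈ loc_min := by simpa using hc
      rw [if_neg (fun h => h.1 (by simpa using hmem))]
      refine (max_getD_of_isMax ?_ ?_).symm
      · simp only [List.mem_filter, Bool.and_eq_true, decide_eq_true_eq]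
        exact ⟨hmem, by omega, le_refl _⟩
      · intro y hy
        simp only [List.mem_filter, Bool.and_eq_true, decide_eq_true_eq] at hy
        exact hy.2.2
    · have hnm : i ∉ loc_min := by simpa using hc
      rw [if_pos ⟨hc, by omega⟩]
      rw [ih (i - 1) (by omega)]
      congr 2
      apply List.filter_congr
      intro m hm
      have hne : m ≠ i := fun h => hnm (h ▸ hm)
      by_cases h0 : (0 : Int) ≤ m
      · by_cases h1 : m ≤ i - 1
        · simp [h0, h1, show m ≤ i by omega]
        · simp [h0, h1, show ¬ m ≤ i by omega]
      · simp [h0]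

theorem up_eq (loc_min : List Int) (final_idx : Int) : ∀ (n : Nat) (i : Int),
    final_idx - i = (n : Int) →
    pyUp loc_min final_idx (n + 1) i
      = (PySem.List.min? (loc_min.filter (fun m => decide (i ≤ m) && decide (m ≤ final_idx))) (fun x => x)).getD final_idx := by
  intro n
  induction n with
  | zero =>
    intro i hi
    have : i = final_idx := by omega
    subst this
    simp only [pyUp, ne_eq, not_true_eq_false, and_false, if_false]
    cases h : PySem.List.min? (loc_min.filter (fun m => decide (i ≤ m) && decide (m ≤ i))) (fun x => x) with
    | none => rfl
    | some m =>
      have hm := PySem.List.min?_mem h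
      simp only [List.mem_filter, Bool.and_eq_true, decide_eq_true_eq] at hm
      simp only [Option.getD_some]
      omega
  | succ k ih =>
    intro i hi
    have hlt : i < final_idx := by omega
    show (if ¬ loc_min.contains i ∧ i ≠ final_idx then pyUp loc_min final_idx (k + 1) (i + 1) else i) = _
    by_cases hc : loc_min.contains i
    · have hmem : i ∈ loc_min := by simpa using hc
      rw [if_neg (fun h => h.1 (by simpa using hmem))]
      refine (min_getD_of_isMin ?_ ?_).symm
      · simp only [List.mem_filter, Bool.and_eq_true, decide_eq_true_eq]
        exact ⟨hmem, le_refl _, by omega⟩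
      · intro y hy
        simp only [List.mem_filter, Bool.and_eq_true, decide_eq_true_eq] at hy
        exact hy.2.1
    · have hnm : i ∉ loc_min := by simpa using hc
      rw [if_pos ⟨hc, by omega⟩]
      rw [ih (i + 1) (by omega)]
      congr 2
      apply List.filter_congr
      intro m hm
      have hne : m ≠ i := fun h => hnm (h ▸ hm)
      by_cases h1 : m ≤ final_idx
      · by_cases h0 : i + 1 ≤ m
        · simp [h0, h1, show i ≤ m by omega]
        · simp [h0, h1, show ¬ i ≤ m by omega]
      · simp [h1]

theorem foldl_append_map {α β : Type} (f : α → β) :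
    ∀ (xs : List α) (acc : List β), xs.foldl (fun t x => t ++ [f x]) acc = acc ++ xs.map f := by
  intro xs
  induction xs with
  | nil => intro acc; simp
  | cons x t ih => intro acc; simp [List.foldl_cons, ih]

-- ===== VERDICT (by name: the statement is the Claim_ definition above) =====
theorem extrema_triplets_py_spec : Claim_equal_extrema_triplets_py := by
  intro loc_max loc_min final_idx _hdom hpre
  unfold Spec_extrema_triplets_py extrema_triplets_py extrema_triplets_py_alt
  rw [foldl_append_map]
  simp only [List.nil_append]
  apply List.map_congr_left
  intro lmax hmem
  obtain ⟨h0, h1⟩ := hpre lmax hmem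
  have hd := down_eq loc_min lmax.toNat lmax (by omega)
  have hu := up_eq loc_min final_idx (final_idx - lmax).toNat lmax (by omega)
  rw [hd, hu]
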